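-- pv_equiv track=rewrite | github.com/leonsolon/coding-challenges | hackerrank/1-month-preparation-kit/week3/the-bomberman-game/guilherme.py | detonate_bombs
-- ===== SOURCE A (Python) =====
-- def detonate_bombs(grid, i):
--     pos = i - 3
--     bombs = []
--     for j, string in enumerate(grid):
--         if pos in string:
--             for k, s in enumerate(string):
--                 if s == pos:
--                     bombs.append((j, k))
--     for (j, k) in bombs:
--         grid[j][k] = -1
--         if j - 1 >= 0:
--             grid[j - 1][k] = -1
--         if j + 1 < len(grid):
--             grid[j + 1][k] = -1
--         if k - 1 >= 0:
--             grid[j][k - 1] = -1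
--         if k + 1 < len(grid[j]):
--             grid[j][k + 1] = -1
--     return grid
-- ===== SOURCE B (Python) =====
-- def detonate_bombs(grid, i):
--     # Pull/stencil formulation: each output cell is computed directly from reads of
--     # its own value and its orthogonal neighbours in the original grid -- no bomb
--     # list, no per-bomb write phase.  Mutates the rows of grid in place like A;
--     # the stated equivalence is about the return value.
--     pos = i - 3
--     out = [[-1 if (v == pos
--                    or (k > 0 and row[k - 1] == pos)
--                    or (k + 1 < len(row) and row[k + 1] == pos)
--                    or (j > 0 and k < len(grid[j - 1]) and grid[j - 1][k] == pos)
--                    or (j + 1 < len(grid) and k < len(grid[j + 1]) and grid[j + 1][k] == pos))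
--             else v
--             for k, v in enumerate(row)]
--            for j, row in enumerate(grid)]
--     for j, row in enumerate(out):
--         grid[j][:] = row
--     return grid
-- ===== Notes on version B (the rewrite author's own statement) =====
-- stated objective: alternative
-- what changed: A is push-style: it collects a bomb list and performs five bounds-checked -1 writes per bomb; B is pull-style: a single stencil comprehension computes each output cell directly from reads of that cell and its orthogonal neighbours in the original grid, with no bomb list and no write phase.
import Mathlib
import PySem

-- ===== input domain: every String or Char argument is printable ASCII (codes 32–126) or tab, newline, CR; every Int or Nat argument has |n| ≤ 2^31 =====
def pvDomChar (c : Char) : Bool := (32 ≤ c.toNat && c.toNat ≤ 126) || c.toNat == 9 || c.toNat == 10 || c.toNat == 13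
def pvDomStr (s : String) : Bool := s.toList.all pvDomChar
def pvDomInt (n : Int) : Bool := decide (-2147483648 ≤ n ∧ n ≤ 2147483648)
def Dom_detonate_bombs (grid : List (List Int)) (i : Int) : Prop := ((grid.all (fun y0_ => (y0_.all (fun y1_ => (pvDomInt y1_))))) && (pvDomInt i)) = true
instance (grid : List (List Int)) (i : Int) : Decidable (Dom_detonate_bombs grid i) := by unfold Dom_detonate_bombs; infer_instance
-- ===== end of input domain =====

-- A is push-style (bomb list, then five bounds-checked -1 writes per bomb); B is pull-style
-- (one stencil pass computing each output cell from reads of its neighbourhood; no bomb list,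
-- no write phase).  Objective: alternative decomposition, same cost.  Both Pythons mutate the
-- rows of `grid` in place; the theorems are about the return value.

-- grid[j][k] = -1 (A's primitive write; no-op where Python's assignment would raise
-- IndexError — exactly the inputs Pre_detonate_bombs excludes)
def pvSetCell (g : List (List Int)) (j k : Int) : List (List Int) :=
  PySem.List.pySetD g j (PySem.List.pySetD (PySem.List.pyGetD g j []) k (-1))

-- ===== PORT A =====
-- fold body of A's detonation loop: the five bounds-checked writes for one bomb
def pvBodyA (g : List (List Int)) (c : Int × Int) : List (List Int) :=
  let g1 := pvSetCell g c.1 c.2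
  let g2 := if c.1 - 1 ≥ 0 then pvSetCell g1 (c.1 - 1) c.2 else g1
  let g3 := if c.1 + 1 < PySem.List.len g2 then pvSetCell g2 (c.1 + 1) c.2 else g2
  let g4 := if c.2 - 1 ≥ 0 then pvSetCell g3 c.1 (c.2 - 1) else g3
  if c.2 + 1 < PySem.List.len (PySem.List.pyGetD g4 c.1 []) then pvSetCell g4 c.1 (c.2 + 1) else g4

def detonate_bombs (grid : List (List Int)) (i : Int) : List (List Int) :=
  let pos := i - 3
  let bombs : List (Int × Int) :=
    (PySem.List.enumerate grid 0).foldl (fun acc js =>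
      if pos ∈ js.2 then
        (PySem.List.enumerate js.2 0).foldl (fun acc2 ks =>
          if ks.2 = pos then acc2 ++ [(js.1, ks.1)] else acc2) acc
      else acc) []
  bombs.foldl pvBodyA grid

-- ===== PORT B =====
-- stencil comprehension: one cell of output from reads of the original grid
def detonate_bombs_alt (grid : List (List Int)) (i : Int) : List (List Int) :=
  let pos := i - 3
  (PySem.List.enumerate grid 0).map (fun js =>
    (PySem.List.enumerate js.2 0).map (fun kv =>
      if kv.2 = pos
         ∨ (kv.1 > 0 ∧ PySem.List.pyGetD js.2 (kv.1 - 1) 0 = pos)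
         ∨ (kv.1 + 1 < PySem.List.len js.2 ∧ PySem.List.pyGetD js.2 (kv.1 + 1) 0 = pos)
         ∨ (js.1 > 0 ∧ kv.1 < PySem.List.len (PySem.List.pyGetD grid (js.1 - 1) []) ∧
              PySem.List.pyGetD (PySem.List.pyGetD grid (js.1 - 1) []) kv.1 0 = pos)
         ∨ (js.1 + 1 < PySem.List.len grid ∧ kv.1 < PySem.List.len (PySem.List.pyGetD grid (js.1 + 1) []) ∧
              PySem.List.pyGetD (PySem.List.pyGetD grid (js.1 + 1) []) kv.1 0 = pos)
      then -1 else kv.2))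

-- ===== PRECONDITION & SPEC =====
-- Pre_ excludes exactly the ragged grids on which Python A raises IndexError: a bomb cell
-- (j,k) whose value is i-3 while the row above or below is shorter than k+1 (the write
-- grid[j∓1][k] = -1 is out of range).
def Pre_detonate_bombs (grid : List (List Int)) (i : Int) : Prop :=
  ∀ j < grid.length, ∀ k < (grid.getD j []).length, (grid.getD j []).getD k 0 = i - 3 →
    (1 ≤ j → k < (grid.getD (j - 1) []).length) ∧
    (j + 1 < grid.length → k < (grid.getD (j + 1) []).length)
instance (grid : List (List Int)) (i : Int) : Decidable (Pre_detonate_bombs grid i) := by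
  unfold Pre_detonate_bombs; infer_instance

def pvWitness_detonate_bombs : List (List Int) × Int := ([[2, 1], [0, 2]], 5)

def Spec_detonate_bombs (grid : List (List Int)) (i : Int) (out : List (List Int)) : Prop := out = detonate_bombs_alt grid i
instance (grid : List (List Int)) (i : Int) (out : List (List Int)) : Decidable (Spec_detonate_bombs grid i out) := by unfold Spec_detonate_bombs; infer_instance

-- ===== CLAIM (what is proved, stated in full; the proofs are below) =====
def Claim_equal_detonate_bombs : Prop := ∀ (grid : List (List Int)) (i : Int), Dom_detonate_bombs grid i → Pre_detonate_bombs grid i → Spec_detonate_bombs grid i (detonate_bombs grid i)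

-- ===== LEMMAS AND PROOFS =====

-- cell read used only by the proofs
def pvCell (g : List (List Int)) (j k : Nat) : Option Int :=
  g[j]?.bind (fun r => r[k]?)

-- the coordinates A clears for a bomb at c
def pvTargets (grid : List (List Int)) (c : Int × Int) : List (Int × Int) :=
  (c.1, c.2) ::
    ((if c.1 - 1 ≥ 0 then [(c.1 - 1, c.2)] else []) ++
     (if c.1 + 1 < PySem.List.len grid then [(c.1 + 1, c.2)] else []) ++
     (if c.2 - 1 ≥ 0 then [(c.1, c.2 - 1)] else []) ++
     (if c.2 + 1 < PySem.List.len (PySem.List.pyGetD grid c.1 []) then [(c.1, c.2 + 1)] else []))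

-- the bomb coordinates, row-major
def pvBombs (grid : List (List Int)) (pos : Int) : List (Int × Int) :=
  (PySem.List.enumerate grid 0).flatMap (fun js =>
    ((PySem.List.enumerate js.2 0).filter (fun ks => decide (ks.2 = pos))).map (fun ks => (js.1, ks.1)))

-- writing -1 at every coordinate of a list, left to right
def pvWriteAll (g : List (List Int)) (L : List (Int × Int)) : List (List Int) :=
  L.foldl (fun g c => pvSetCell g c.1 c.2) g

-- B's read condition at cell (j,k), expressed over the original grid (Bool so it can
-- sit inside an if without extra Decidable instances)
def pvCond (grid : List (List Int)) (pos : Int) (j k : Nat) : Bool :=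
  decide (pvCell grid j k = some pos)
  || (decide (0 < k) && decide (pvCell grid j (k - 1) = some pos))
  || decide (pvCell grid j (k + 1) = some pos)
  || (decide (0 < j) && decide (pvCell grid (j - 1) k = some pos))
  || decide (pvCell grid (j + 1) k = some pos)

lemma pvSetCell_eq (g : List (List Int)) (a b : Int) (ha : 0 ≤ a) (hb : 0 ≤ b) :
    pvSetCell g a b = g.set a.toNat ((g.getD a.toNat []).set b.toNat (-1)) := by
  unfold pvSetCell
  rw [PySem.List.pySetD_of_nonneg _ _ ha, PySem.List.pySetD_of_nonneg _ _ hb]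
  have hg : PySem.List.pyGetD g a ([] : List Int) = g.getD a.toNat [] := by
    have := PySem.List.pyGetD_natCast (xs := g) (n := a.toNat) (d := ([] : List Int))
    rw [Int.toNat_of_nonneg ha] at this; exact this
  rw [hg]

lemma pvSetCell_length (g : List (List Int)) (a b : Int) (ha : 0 ≤ a) (hb : 0 ≤ b) :
    (pvSetCell g a b).length = g.length := by
  rw [pvSetCell_eq g a b ha hb]; simp

lemma pvSetCell_rowlen (g : List (List Int)) (a b : Int) (ha : 0 ≤ a) (hb : 0 ≤ b) (j : Nat) :
    (pvSetCell g a b)[j]?.map List.length = g[j]?.map List.length := by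
  rw [pvSetCell_eq g a b ha hb]
  rw [List.getElem?_set]
  split_ifs with h1 h2
  · subst h1
    simp [List.getD, h2, List.getElem?_eq_getElem h2]
  · subst h1; simp [List.getElem?_eq_none (by omega : g.length ≤ a.toNat)]
  · rfl

lemma pvSetCell_cell (g : List (List Int)) (a b : Int) (ha : 0 ≤ a) (hb : 0 ≤ b) (j k : Nat) :
    pvCell (pvSetCell g a b) j k =
      if (a = ↑j ∧ b = ↑k) ∧ (pvCell g j k).isSome then some (-1) else pvCell g j k := by
  rw [pvCell, pvSetCell_eq g a b ha hb]
  by_cases hj : a.toNat = j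
  · subst hj
    by_cases hlt : a.toNat < g.length
    · rw [List.getElem?_set_self hlt]
      rw [List.getD_eq_getElem g [] hlt]
      simp only [Option.bind_some]
      by_cases hk : b.toNat = k
      · subst hk
        by_cases hkl : b.toNat < g[a.toNat].length
        · rw [List.getElem?_set_self hkl]
          have hpos : (a = ↑a.toNat ∧ b = ↑b.toNat) := ⟨(Int.toNat_of_nonneg ha).symm, (Int.toNat_of_nonneg hb).symm⟩
          have hsome : (pvCell g a.toNat b.toNat).isSome := by
            simp [pvCell, List.getElem?_eq_getElem hlt, List.getElem?_eq_getElem hkl]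
          rw [if_pos ⟨hpos, hsome⟩]
        · have h0 : g[a.toNat][b.toNat]? = none := List.getElem?_eq_none (by omega)
          rw [List.getElem?_set_self', h0]
          simp [pvCell, List.getElem?_eq_getElem hlt, h0]
      · have hb' : ¬ (a = ↑a.toNat ∧ b = ↑k) := by
          intro ⟨_, h2⟩; apply hk; omega
        rw [List.getElem?_set_ne hk, if_neg (fun h => hb' h.1)]
        simp [pvCell, List.getElem?_eq_getElem hlt]
    · have h0 : g[a.toNat]? = none := List.getElem?_eq_none (by omega)
      rw [List.set_eq_of_length_le (by omega), h0]
      simp [pvCell, h0]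
  · have ha' : ¬ (a = ↑j ∧ b = ↑k) := by
      intro ⟨h1, _⟩; apply hj; omega
    rw [List.getElem?_set_ne hj]
    simp [pvCell, ha']

lemma pvWriteAll_rowlen (L : List (Int × Int)) (hL : ∀ c ∈ L, 0 ≤ c.1 ∧ 0 ≤ c.2) :
    ∀ (g : List (List Int)) (j : Nat), (pvWriteAll g L)[j]?.map List.length = g[j]?.map List.length := by
  induction L with
  | nil => intro g j; rfl
  | cons c L ih =>
    intro g j
    have hc := hL c (by simp)
    have hL' : ∀ c ∈ L, 0 ≤ c.1 ∧ 0 ≤ c.2 := fun c hcm => hL c (by simp [hcm])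
    show (pvWriteAll (pvSetCell g c.1 c.2) L)[j]?.map List.length = _
    rw [ih hL' (pvSetCell g c.1 c.2) j, pvSetCell_rowlen g c.1 c.2 hc.1 hc.2 j]

lemma pvWriteAll_length (L : List (Int × Int)) (hL : ∀ c ∈ L, 0 ≤ c.1 ∧ 0 ≤ c.2)
    (g : List (List Int)) : (pvWriteAll g L).length = g.length := by
  induction L generalizing g with
  | nil => rfl
  | cons c L ih =>
    have hc := hL c (by simp)
    have hL' : ∀ c ∈ L, 0 ≤ c.1 ∧ 0 ≤ c.2 := fun c hcm => hL c (by simp [hcm])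
    show (pvWriteAll (pvSetCell g c.1 c.2) L).length = _
    rw [ih hL', pvSetCell_length g c.1 c.2 hc.1 hc.2]

lemma pvWriteAll_cell (L : List (Int × Int)) (hL : ∀ c ∈ L, 0 ≤ c.1 ∧ 0 ≤ c.2) :
    ∀ (g : List (List Int)) (j k : Nat),
      pvCell (pvWriteAll g L) j k =
        if ((↑j, ↑k) : Int × Int) ∈ L ∧ (pvCell g j k).isSome then some (-1) else pvCell g j k := by
  induction L with
  | nil => intro g j k; simp [pvWriteAll]
  | cons c L ih =>
    intro g j k
    have hc := hL c (by simp)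
    have hL' : ∀ c ∈ L, 0 ≤ c.1 ∧ 0 ≤ c.2 := fun c hcm => hL c (by simp [hcm])
    show pvCell (pvWriteAll (pvSetCell g c.1 c.2) L) j k = _
    rw [ih hL' (pvSetCell g c.1 c.2) j k]
    rw [pvSetCell_cell g c.1 c.2 hc.1 hc.2 j k]
    by_cases hs : (pvCell g j k).isSome
    · by_cases h1 : c.1 = ↑j ∧ c.2 = ↑k
      · have hcm : ((↑j, ↑k) : Int × Int) ∈ c :: L :=
          List.mem_cons.mpr (Or.inl (Prod.ext h1.1.symm h1.2.symm))
        simp [h1, hs, hcm]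
      · by_cases h2 : ((↑j, ↑k) : Int × Int) ∈ L
        · simp [h1, hs, h2, List.mem_cons]
        · have hnotin : ((↑j, ↑k) : Int × Int) ∉ c :: L := by
            intro hm
            rcases List.mem_cons.mp hm with he | hm2
            · exact h1 ⟨(congrArg Prod.fst he).symm, (congrArg Prod.snd he).symm⟩
            · exact h2 hm2
          simp [h1, hs, h2, hnotin]
    · have hs' : (pvCell g j k).isSome = false := by simpa using hs
      simp [hs']

lemma pvGrid_ext (g1 g2 : List (List Int)) (hl : g1.length = g2.length)
    (hrow : ∀ j : Nat, g1[j]?.map List.length = g2[j]?.map List.length)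
    (hcell : ∀ j k : Nat, pvCell g1 j k = pvCell g2 j k) : g1 = g2 := by
  apply List.ext_getElem?
  intro j
  by_cases hj : j < g1.length
  · have hj2 : j < g2.length := by omega
    rw [List.getElem?_eq_getElem hj, List.getElem?_eq_getElem hj2]
    have hlr : g1[j].length = g2[j].length := by
      have := hrow j
      rw [List.getElem?_eq_getElem hj, List.getElem?_eq_getElem hj2] at this
      simpa using this
    congr 1
    apply List.ext_getElem?
    intro k
    have := hcell j k
    rw [pvCell, pvCell, List.getElem?_eq_getElem hj, List.getElem?_eq_getElem hj2] at this
    simpa using this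
  · rw [List.getElem?_eq_none (by omega), List.getElem?_eq_none (by omega)]

lemma pvTargets_nonneg (grid : List (List Int)) (c : Int × Int) (hc : 0 ≤ c.1 ∧ 0 ≤ c.2) :
    ∀ x ∈ pvTargets grid c, 0 ≤ x.1 ∧ 0 ≤ x.2 := by
  intro x hx
  unfold pvTargets at hx
  simp only [List.mem_cons, List.mem_append] at hx
  rcases hx with rfl | hx
  · exact hc
  · rcases hx with ((hx | hx) | hx) | hx <;> split_ifs at hx with hcond <;>
      simp only [List.mem_singleton, List.not_mem_nil] at hx <;> subst hx <;>
      refine ⟨by omega, by omega⟩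

lemma pvRowLen_congr (grid g : List (List Int)) (a : Int) (ha : 0 ≤ a)
    (h : ∀ j : Nat, g[j]?.map List.length = grid[j]?.map List.length) :
    PySem.List.len (PySem.List.pyGetD g a []) = PySem.List.len (PySem.List.pyGetD grid a []) := by
  have hgg : ∀ (x : List (List Int)), PySem.List.pyGetD x a ([] : List Int) = x.getD a.toNat [] := by
    intro x
    have := PySem.List.pyGetD_natCast (xs := x) (n := a.toNat) (d := ([] : List Int))
    rw [Int.toNat_of_nonneg ha] at this; exact this
  rw [hgg g, hgg grid]
  have hh := h a.toNat
  rw [List.getD_eq_getElem?_getD, List.getD_eq_getElem?_getD]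
  cases e1 : g[a.toNat]? <;> cases e2 : grid[a.toNat]? <;> rw [e1, e2] at hh <;>
    simp_all [PySem.List.len]

lemma pvBodyA_eq (grid g : List (List Int)) (c : Int × Int) (hc : 0 ≤ c.1 ∧ 0 ≤ c.2)
    (hlen : g.length = grid.length)
    (hrow : ∀ j : Nat, g[j]?.map List.length = grid[j]?.map List.length) :
    pvBodyA g c = pvWriteAll g (pvTargets grid c) := by
  obtain ⟨hc1, hc2⟩ := hc
  have Sh : ∀ (L : List (Int × Int)), (∀ x ∈ L, 0 ≤ x.1 ∧ 0 ≤ x.2) →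
      (pvWriteAll g L).length = grid.length ∧
      (∀ j : Nat, (pvWriteAll g L)[j]?.map List.length = grid[j]?.map List.length) :=
    fun L hL => ⟨(pvWriteAll_length L hL g).trans hlen,
      fun j => (pvWriteAll_rowlen L hL g j).trans (hrow j)⟩
  have hlenW : ∀ (L : List (Int × Int)), (∀ x ∈ L, 0 ≤ x.1 ∧ 0 ≤ x.2) →
      PySem.List.len (pvWriteAll g L) = PySem.List.len grid := by
    intro L hL
    simp only [PySem.List.len, (Sh L hL).1]
  have hrowW : ∀ (L : List (Int × Int)), (∀ x ∈ L, 0 ≤ x.1 ∧ 0 ≤ x.2) →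
      PySem.List.len (PySem.List.pyGetD (pvWriteAll g L) c.1 []) =
        PySem.List.len (PySem.List.pyGetD grid c.1 []) :=
    fun L hL => pvRowLen_congr grid (pvWriteAll g L) c.1 hc1 (Sh L hL).2
  have hcons : ∀ (g' : List (List Int)) (a b : Int) (l : List (Int × Int)),
      pvWriteAll g' ((a, b) :: l) = pvWriteAll (pvSetCell g' a b) l := fun _ _ _ _ => rfl
  have happ : ∀ (g' : List (List Int)) (l1 l2 : List (Int × Int)),
      pvWriteAll g' (l1 ++ l2) = pvWriteAll (pvWriteAll g' l1) l2 := by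
    intro g' l1 l2; unfold pvWriteAll; rw [List.foldl_append]
  have hif : ∀ (g' : List (List Int)) (p : Prop) (hp : Decidable p) (a b : Int),
      pvWriteAll g' (if p then [(a, b)] else []) = if p then pvSetCell g' a b else g' := by
    intro g' p hp a b; split_ifs <;> rfl
  simp only [pvBodyA]
  set G2 := if c.1 - 1 ≥ 0 then pvSetCell (pvSetCell g c.1 c.2) (c.1 - 1) c.2 else pvSetCell g c.1 c.2 with hG2
  have e2 : PySem.List.len G2 = PySem.List.len grid := by
    rw [hG2]; split_ifs with h1
    · exact hlenW [(c.1, c.2), (c.1 - 1, c.2)] (by intro x hx; fin_cases hx <;> exact ⟨by omega, by omega⟩)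
    · exact hlenW [(c.1, c.2)] (by intro x hx; fin_cases hx <;> exact ⟨by omega, by omega⟩)
  rw [e2]
  set G3 := if c.1 + 1 < PySem.List.len grid then pvSetCell G2 (c.1 + 1) c.2 else G2 with hG3
  set G4 := if c.2 - 1 ≥ 0 then pvSetCell G3 c.1 (c.2 - 1) else G3 with hG4
  have e4 : PySem.List.len (PySem.List.pyGetD G4 c.1 []) =
      PySem.List.len (PySem.List.pyGetD grid c.1 []) := by
    rw [hG4, hG3, hG2]
    by_cases h1 : c.1 - 1 ≥ 0
    · by_cases h2 : c.1 + 1 < PySem.List.len grid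
      · by_cases h3 : c.2 - 1 ≥ 0
        · simp only [if_pos h1, if_pos h2, if_pos h3]
          exact hrowW [(c.1, c.2), (c.1 - 1, c.2), (c.1 + 1, c.2), (c.1, c.2 - 1)] (by intro x hx; fin_cases hx <;> exact ⟨by omega, by omega⟩)
        · simp only [if_pos h1, if_pos h2, if_neg h3]
          exact hrowW [(c.1, c.2), (c.1 - 1, c.2), (c.1 + 1, c.2)] (by intro x hx; fin_cases hx <;> exact ⟨by omega, by omega⟩)
      · by_cases h3 : c.2 - 1 ≥ 0
        · simp only [if_pos h1, if_neg h2, if_pos h3]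
          exact hrowW [(c.1, c.2), (c.1 - 1, c.2), (c.1, c.2 - 1)] (by intro x hx; fin_cases hx <;> exact ⟨by omega, by omega⟩)
        · simp only [if_pos h1, if_neg h2, if_neg h3]
          exact hrowW [(c.1, c.2), (c.1 - 1, c.2)] (by intro x hx; fin_cases hx <;> exact ⟨by omega, by omega⟩)
    · by_cases h2 : c.1 + 1 < PySem.List.len grid
      · by_cases h3 : c.2 - 1 ≥ 0
        · simp only [if_neg h1, if_pos h2, if_pos h3]
          exact hrowW [(c.1, c.2), (c.1 + 1, c.2), (c.1, c.2 - 1)] (by intro x hx; fin_cases hx <;> exact ⟨by omega, by omega⟩)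
        · simp only [if_neg h1, if_pos h2, if_neg h3]
          exact hrowW [(c.1, c.2), (c.1 + 1, c.2)] (by intro x hx; fin_cases hx <;> exact ⟨by omega, by omega⟩)
      · by_cases h3 : c.2 - 1 ≥ 0
        · simp only [if_neg h1, if_neg h2, if_pos h3]
          exact hrowW [(c.1, c.2), (c.1, c.2 - 1)] (by intro x hx; fin_cases hx <;> exact ⟨by omega, by omega⟩)
        · simp only [if_neg h1, if_neg h2, if_neg h3]
          exact hrowW [(c.1, c.2)] (by intro x hx; fin_cases hx <;> exact ⟨by omega, by omega⟩)
  rw [e4]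
  simp only [pvTargets]
  rw [hcons, happ, happ, happ, hif, hif, hif, hif]

lemma pvBombs_nonneg (grid : List (List Int)) (pos : Int) :
    ∀ c ∈ pvBombs grid pos, 0 ≤ c.1 ∧ 0 ≤ c.2 := by
  intro c hc
  unfold pvBombs at hc
  rw [List.mem_flatMap] at hc
  obtain ⟨js, hjs, hc2⟩ := hc
  rw [List.mem_map] at hc2
  obtain ⟨ks, hks, rfl⟩ := hc2
  rw [List.mem_filter] at hks
  obtain ⟨k1, hk1, e1⟩ := (PySem.List.mem_enumerate_iff _ _ _).mp hjs
  obtain ⟨k2, hk2, e2⟩ := (PySem.List.mem_enumerate_iff _ _ _).mp hks.1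
  constructor
  · show 0 ≤ js.1; rw [e1]; simp
  · show 0 ≤ ks.1; rw [e2]; simp

lemma pvFoldA (grid : List (List Int)) (bombs : List (Int × Int))
    (hb : ∀ c ∈ bombs, 0 ≤ c.1 ∧ 0 ≤ c.2) :
    ∀ (g : List (List Int)), g.length = grid.length →
      (∀ j : Nat, g[j]?.map List.length = grid[j]?.map List.length) →
      bombs.foldl pvBodyA g = pvWriteAll g (bombs.flatMap (pvTargets grid)) := by
  induction bombs with
  | nil => intro g _ _; rfl
  | cons c bombs ih =>
    intro g hg1 hg2
    have hc := hb c (by simp)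
    have hb' : ∀ c ∈ bombs, 0 ≤ c.1 ∧ 0 ≤ c.2 := fun c hcm => hb c (by simp [hcm])
    have hT := pvTargets_nonneg grid c hc
    rw [List.foldl_cons, pvBodyA_eq grid g c hc hg1 hg2]
    rw [ih hb' (pvWriteAll g (pvTargets grid c))
      ((pvWriteAll_length _ hT g).trans hg1)
      (fun j => (pvWriteAll_rowlen _ hT g j).trans (hg2 j))]
    rw [List.flatMap_cons]
    unfold pvWriteAll
    rw [List.foldl_append]

lemma pvA_eq (grid : List (List Int)) (i : Int) :
    detonate_bombs grid i = pvWriteAll grid ((pvBombs grid (i - 3)).flatMap (pvTargets grid)) := by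
  simp only [detonate_bombs]
  have hb1 : ∀ (acc : List (Int × Int)) (js : Int × List Int),
      (if (i - 3) ∈ js.2 then
        (PySem.List.enumerate js.2 0).foldl
          (fun acc2 ks => if ks.2 = (i - 3) then acc2 ++ [(js.1, ks.1)] else acc2) acc
      else acc)
        = acc ++ ((PySem.List.enumerate js.2 0).filter
            (fun ks => decide (ks.2 = i - 3))).map (fun ks => (js.1, ks.1)) := by
    intro acc js
    split_ifs with hmem
    · exact PySem.List.foldl_append_ite (fun (ks : Int × Int) => ks.2 = i - 3) (fun (ks : Int × Int) => (js.1, ks.1)) (PySem.List.enumerate js.2 0) acc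
    · have hnil : (PySem.List.enumerate js.2 0).filter (fun ks => decide (ks.2 = i - 3)) = [] := by
        rw [List.filter_eq_nil_iff]
        intro ks hks
        obtain ⟨k, hk, rfl⟩ := (PySem.List.mem_enumerate_iff _ _ _).mp hks
        simp only [decide_eq_true_eq]
        intro he
        exact hmem (he ▸ List.getElem_mem hk)
      rw [hnil]; simp
  have hbody : (fun (acc : List (Int × Int)) (js : Int × List Int) =>
      if (i - 3) ∈ js.2 then
        (PySem.List.enumerate js.2 0).foldl
          (fun acc2 ks => if ks.2 = (i - 3) then acc2 ++ [(js.1, ks.1)] else acc2) acc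
      else acc)
        = (fun (acc : List (Int × Int)) (js : Int × List Int) => acc ++ ((PySem.List.enumerate js.2 0).filter
            (fun ks => decide (ks.2 = i - 3))).map (fun ks => (js.1, ks.1))) := by
    funext acc js; exact hb1 acc js
  rw [hbody, PySem.List.foldl_append_eq_flatMap]
  rw [List.nil_append]
  exact pvFoldA grid (pvBombs grid (i - 3)) (pvBombs_nonneg grid (i - 3)) grid rfl (fun j => rfl)

-- pvCell characterised by getElem
lemma pvCell_eq_some (g : List (List Int)) (j k : Nat) (v : Int) :
    pvCell g j k = some v ↔ ∃ (hj : j < g.length) (hk : k < g[j].length), g[j][k] = v := by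
  unfold pvCell
  by_cases hj : j < g.length
  · rw [List.getElem?_eq_getElem hj]
    by_cases hk : k < g[j].length
    · rw [Option.bind_some, List.getElem?_eq_getElem hk]
      simp [hj, hk]
    · rw [Option.bind_some, List.getElem?_eq_none (by omega)]
      simp [hk]
  · rw [List.getElem?_eq_none (by omega)]
    simp [hj]

-- bomb list characterised cell-wise
lemma pvBombs_mem (grid : List (List Int)) (pos : Int) (x : Int × Int) :
    x ∈ pvBombs grid pos ↔ ∃ a b : Nat, x = ((↑a : Int), (↑b : Int)) ∧ pvCell grid a b = some pos := by
  unfold pvBombs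
  rw [List.mem_flatMap]
  constructor
  · rintro ⟨js, hjs, hx⟩
    rw [List.mem_map] at hx
    obtain ⟨ks, hks, rfl⟩ := hx
    rw [List.mem_filter] at hks
    obtain ⟨a, hja, e1⟩ := (PySem.List.mem_enumerate_iff _ _ _).mp hjs
    obtain ⟨b, hkb, e2⟩ := (PySem.List.mem_enumerate_iff _ _ _).mp hks.1
    refine ⟨a, b, ?_, ?_⟩
    · rw [e1, e2]; simp
    · rw [pvCell_eq_some]
      have hv : ks.2 = pos := by simpa using hks.2
      have : js.2 = grid[a] := by rw [e1]
      refine ⟨hja, by rw [← this]; exact hkb, ?_⟩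
      have : ks.2 = js.2[b] := by rw [e2]
      simp only [e1] at this ⊢
      rw [← this, hv]
  · rintro ⟨a, b, rfl, hc⟩
    rw [pvCell_eq_some] at hc
    obtain ⟨hja, hkb, hv⟩ := hc
    refine ⟨((↑a : Int), grid[a]), ?_, ?_⟩
    · rw [PySem.List.mem_enumerate_iff]
      exact ⟨a, hja, by simp⟩
    · rw [List.mem_map]
      refine ⟨((↑b : Int), grid[a][b]), ?_, rfl⟩
      rw [List.mem_filter]
      exact ⟨(PySem.List.mem_enumerate_iff _ _ _).mpr ⟨b, hkb, by simp⟩, by simp [hv]⟩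

-- row read at a Nat index that is in range
lemma pvRow_some (g : List (List Int)) (a : Nat) (ha : a < g.length) :
    PySem.List.pyGetD g ((a : Int)) ([] : List Int) = g[a] := by
  rw [PySem.List.pyGetD_natCast, List.getD_eq_getElem g [] ha]

lemma pvCell_row (g : List (List Int)) (a k : Nat) (ha : a < g.length) :
    pvCell g a k = g[a][k]? := by
  unfold pvCell; rw [List.getElem?_eq_getElem ha]; rfl

-- B's guarded in-row read, as an Option read
lemma pvRead_iff (r : List Int) (b : Nat) (pos : Int) :
    (((b : Int)) < PySem.List.len r ∧ PySem.List.pyGetD r ((b : Int)) 0 = pos) ↔ r[b]? = some pos := by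
  rw [PySem.List.len_eq, PySem.List.pyGetD_natCast]
  by_cases hb : b < r.length
  · rw [List.getD_eq_getElem r 0 hb, List.getElem?_eq_getElem hb]
    constructor
    · rintro ⟨-, h⟩; simpa using h
    · intro h; exact ⟨by exact_mod_cast hb, by simpa using h⟩
  · rw [List.getElem?_eq_none (by omega)]
    constructor
    · rintro ⟨h, -⟩; exact absurd (by exact_mod_cast h : b < r.length) hb
    · intro h; cases h

-- the five target coordinates of a bomb, in Nat form
set_option maxHeartbeats 1600000 in
lemma pvMem_targets (grid : List (List Int)) (a b j k : Nat) :
    ((((j : Int)), ((k : Int))) ∈ pvTargets grid (((a : Int)), ((b : Int)))) ↔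
      ((a = j ∧ b = k) ∨
       (0 < a ∧ a = j + 1 ∧ b = k) ∨
       (a + 1 < grid.length ∧ a + 1 = j ∧ b = k) ∨
       (0 < b ∧ a = j ∧ b = k + 1) ∨
       (b + 1 < (grid.getD a []).length ∧ a = j ∧ b + 1 = k)) := by
  simp only [pvTargets, List.mem_cons, List.mem_append, PySem.List.len_eq,
    PySem.List.pyGetD_natCast, Prod.mk.injEq]
  split_ifs <;>
    simp only [List.mem_singleton, List.not_mem_nil, Prod.mk.injEq, false_or, or_false] <;>
    omega

-- membership in A's clear list ↔ B's read condition, at an existing cell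
lemma pvMem_iff_cond (grid : List (List Int)) (pos : Int) (j k : Nat)
    (hj : j < grid.length) (hk : k < grid[j].length) :
    ((↑j, ↑k) : Int × Int) ∈ (pvBombs grid pos).flatMap (pvTargets grid) ↔ pvCond grid pos j k = true := by
  rw [List.mem_flatMap]
  simp only [pvCond, Bool.or_eq_true, Bool.and_eq_true, decide_eq_true_eq, or_assoc]
  constructor
  · rintro ⟨c, hc, hm⟩
    obtain ⟨a, b, rfl, hcell⟩ := (pvBombs_mem grid pos c).mp hc
    rw [pvMem_targets] at hm
    rcases hm with ⟨rfl, rfl⟩ | ⟨ha, hj', rfl⟩ | ⟨-, hj', rfl⟩ | ⟨hb, rfl, hbk⟩ | ⟨-, rfl, hbk⟩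
    · exact Or.inl hcell
    · subst hj'
      refine Or.inr (Or.inr (Or.inr (Or.inr ?_)))
      simpa using hcell
    · subst hj'
      refine Or.inr (Or.inr (Or.inr (Or.inl ⟨by omega, ?_⟩)))
      simpa using hcell
    · subst hbk
      exact Or.inr (Or.inr (Or.inl hcell))
    · subst hbk
      refine Or.inr (Or.inl ⟨by omega, ?_⟩)
      simpa using hcell
  · intro hcond
    rcases hcond with h | ⟨h0, h⟩ | h | ⟨h0, h⟩ | h
    · exact ⟨(↑j, ↑k), (pvBombs_mem grid pos _).mpr ⟨j, k, rfl, h⟩,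
        (pvMem_targets grid j k j k).mpr (Or.inl ⟨rfl, rfl⟩)⟩
    · refine ⟨(↑j, ↑(k - 1)), (pvBombs_mem grid pos _).mpr ⟨j, k - 1, rfl, h⟩,
        (pvMem_targets grid j (k - 1) j k).mpr ?_⟩
      refine Or.inr (Or.inr (Or.inr (Or.inr ⟨?_, rfl, by omega⟩)))
      rw [List.getD_eq_getElem grid [] hj]; omega
    · exact ⟨(↑j, ↑(k + 1)), (pvBombs_mem grid pos _).mpr ⟨j, k + 1, rfl, h⟩,
        (pvMem_targets grid j (k + 1) j k).mpr (Or.inr (Or.inr (Or.inr (Or.inl ⟨by omega, rfl, rfl⟩))))⟩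
    · exact ⟨(↑(j - 1), ↑k), (pvBombs_mem grid pos _).mpr ⟨j - 1, k, rfl, h⟩,
        (pvMem_targets grid (j - 1) k j k).mpr (Or.inr (Or.inr (Or.inl ⟨by omega, by omega, rfl⟩)))⟩
    · exact ⟨(↑(j + 1), ↑k), (pvBombs_mem grid pos _).mpr ⟨j + 1, k, rfl, h⟩,
        (pvMem_targets grid (j + 1) k j k).mpr (Or.inr (Or.inl ⟨by omega, by omega, rfl⟩))⟩

-- B's output characterised cell-wise
lemma pvB_length (grid : List (List Int)) (i : Int) :
    (detonate_bombs_alt grid i).length = grid.length := by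
  simp [detonate_bombs_alt, PySem.List.length_enumerate]

lemma pvB_rowlen (grid : List (List Int)) (i : Int) (j : Nat) :
    (detonate_bombs_alt grid i)[j]?.map List.length = grid[j]?.map List.length := by
  simp only [detonate_bombs_alt]
  rw [List.getElem?_map, PySem.List.getElem?_enumerate]
  cases h : grid[j]? with
  | none => simp
  | some r => simp [PySem.List.length_enumerate]

-- B's stencil condition at an existing cell, translated to pvCond
lemma pvCondInt_iff (grid : List (List Int)) (pos : Int) (j k : Nat)
    (hj : j < grid.length) (hk : k < grid[j].length) :
    (grid[j][k] = pos
     ∨ (((k : Int)) > 0 ∧ PySem.List.pyGetD grid[j] (((k : Int)) - 1) 0 = pos)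
     ∨ (((k : Int)) + 1 < PySem.List.len grid[j] ∧ PySem.List.pyGetD grid[j] (((k : Int)) + 1) 0 = pos)
     ∨ (((j : Int)) > 0 ∧ ((k : Int)) < PySem.List.len (PySem.List.pyGetD grid (((j : Int)) - 1) []) ∧
          PySem.List.pyGetD (PySem.List.pyGetD grid (((j : Int)) - 1) []) ((k : Int)) 0 = pos)
     ∨ (((j : Int)) + 1 < PySem.List.len grid ∧ ((k : Int)) < PySem.List.len (PySem.List.pyGetD grid (((j : Int)) + 1) []) ∧
          PySem.List.pyGetD (PySem.List.pyGetD grid (((j : Int)) + 1) []) ((k : Int)) 0 = pos))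
    ↔ pvCond grid pos j k = true := by
  simp only [pvCond, Bool.or_eq_true, Bool.and_eq_true, decide_eq_true_eq, or_assoc]
  have D0 : grid[j][k] = pos ↔ pvCell grid j k = some pos := by
    rw [pvCell_row grid j k hj, List.getElem?_eq_getElem hk]; simp
  have D1 : (((k : Int)) > 0 ∧ PySem.List.pyGetD grid[j] (((k : Int)) - 1) 0 = pos) ↔
      (0 < k ∧ pvCell grid j (k - 1) = some pos) := by
    by_cases h0 : 0 < k
    · have e : ((k : Int)) - 1 = (((k - 1 : Nat) : Int)) := by omega
      have hk1 : k - 1 < grid[j].length := by omega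
      rw [e, pvCell_row grid j (k - 1) hj, PySem.List.pyGetD_natCast,
        List.getD_eq_getElem _ 0 hk1, List.getElem?_eq_getElem hk1]
      constructor
      · rintro ⟨-, h⟩; exact ⟨h0, by simpa using h⟩
      · rintro ⟨-, h⟩; exact ⟨by exact_mod_cast h0, by simpa using h⟩
    · constructor
      · rintro ⟨h, -⟩; exact absurd (by exact_mod_cast h : 0 < k) h0
      · rintro ⟨h, -⟩; exact absurd h h0
  have D2 : (((k : Int)) + 1 < PySem.List.len grid[j] ∧ PySem.List.pyGetD grid[j] (((k : Int)) + 1) 0 = pos) ↔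
      pvCell grid j (k + 1) = some pos := by
    have e : ((k : Int)) + 1 = (((k + 1 : Nat) : Int)) := by push_cast; ring
    rw [e, pvCell_row grid j (k + 1) hj]
    exact pvRead_iff grid[j] (k + 1) pos
  have D3 : (((j : Int)) > 0 ∧ ((k : Int)) < PySem.List.len (PySem.List.pyGetD grid (((j : Int)) - 1) []) ∧
        PySem.List.pyGetD (PySem.List.pyGetD grid (((j : Int)) - 1) []) ((k : Int)) 0 = pos) ↔
      (0 < j ∧ pvCell grid (j - 1) k = some pos) := by
    by_cases h0 : 0 < j
    · have e : ((j : Int)) - 1 = (((j - 1 : Nat) : Int)) := by omega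
      have hj1 : j - 1 < grid.length := by omega
      rw [e, pvRow_some grid (j - 1) hj1, pvRead_iff grid[j - 1] k pos,
        pvCell_row grid (j - 1) k hj1]
      constructor
      · rintro ⟨-, h⟩; exact ⟨h0, h⟩
      · rintro ⟨-, h⟩; exact ⟨by exact_mod_cast h0, h⟩
    · constructor
      · rintro ⟨h, -⟩; exact absurd (by exact_mod_cast h : 0 < j) h0
      · rintro ⟨h, -⟩; exact absurd h h0
  have D4 : (((j : Int)) + 1 < PySem.List.len grid ∧ ((k : Int)) < PySem.List.len (PySem.List.pyGetD grid (((j : Int)) + 1) []) ∧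
        PySem.List.pyGetD (PySem.List.pyGetD grid (((j : Int)) + 1) []) ((k : Int)) 0 = pos) ↔
      pvCell grid (j + 1) k = some pos := by
    have e : ((j : Int)) + 1 = (((j + 1 : Nat) : Int)) := by push_cast; ring
    by_cases h1 : j + 1 < grid.length
    · rw [e, pvRow_some grid (j + 1) h1, pvRead_iff grid[j + 1] k pos,
        pvCell_row grid (j + 1) k h1, PySem.List.len_eq]
      constructor
      · rintro ⟨-, h⟩; exact h
      · intro h; exact ⟨by exact_mod_cast h1, h⟩
    · have hn : pvCell grid (j + 1) k = none := by
        unfold pvCell; rw [List.getElem?_eq_none (by omega)]; rfl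
      rw [hn, PySem.List.len_eq]
      constructor
      · rintro ⟨h, -⟩; exact absurd (by exact_mod_cast h : j + 1 < grid.length) h1
      · intro h; cases h
  exact or_congr D0 (or_congr D1 (or_congr D2 (or_congr D3 D4)))

lemma pvB_cell (grid : List (List Int)) (i : Int) (j k : Nat) :
    pvCell (detonate_bombs_alt grid i) j k =
      if pvCond grid (i - 3) j k = true ∧ (pvCell grid j k).isSome then some (-1) else pvCell grid j k := by
  by_cases hj : j < grid.length
  · have hrow : (detonate_bombs_alt grid i)[j]? = some ((PySem.List.enumerate grid[j] 0).map
        (fun kv =>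
          if kv.2 = i - 3
             ∨ (kv.1 > 0 ∧ PySem.List.pyGetD grid[j] (kv.1 - 1) 0 = i - 3)
             ∨ (kv.1 + 1 < PySem.List.len grid[j] ∧ PySem.List.pyGetD grid[j] (kv.1 + 1) 0 = i - 3)
             ∨ (((j : Int)) > 0 ∧ kv.1 < PySem.List.len (PySem.List.pyGetD grid (((j : Int)) - 1) []) ∧
                  PySem.List.pyGetD (PySem.List.pyGetD grid (((j : Int)) - 1) []) kv.1 0 = i - 3)
             ∨ (((j : Int)) + 1 < PySem.List.len grid ∧ kv.1 < PySem.List.len (PySem.List.pyGetD grid (((j : Int)) + 1) []) ∧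
                  PySem.List.pyGetD (PySem.List.pyGetD grid (((j : Int)) + 1) []) kv.1 0 = i - 3)
          then -1 else kv.2)) := by
      simp only [detonate_bombs_alt]
      rw [List.getElem?_map, PySem.List.getElem?_enumerate, List.getElem?_eq_getElem hj]
      simp
    rw [pvCell, hrow, Option.bind_some, List.getElem?_map, PySem.List.getElem?_enumerate]
    by_cases hk : k < grid[j].length
    · rw [List.getElem?_eq_getElem hk]
      simp only [Option.map_some, zero_add]
      have hsome : (pvCell grid j k).isSome := by
        rw [pvCell_row grid j k hj, List.getElem?_eq_getElem hk]; rfl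
      have hCI := pvCondInt_iff grid (i - 3) j k hj hk
      by_cases hc : pvCond grid (i - 3) j k = true
      · rw [if_pos (hCI.mpr hc), if_pos ⟨hc, hsome⟩]
      · rw [if_neg (fun h => hc (hCI.mp h)), if_neg (fun h => hc h.1),
          pvCell_row grid j k hj, List.getElem?_eq_getElem hk]
    · have h2 : grid[j][k]? = none := List.getElem?_eq_none (by omega)
      have hns : pvCell grid j k = none := by rw [pvCell_row grid j k hj, h2]
      rw [h2, hns]
      simp
  · have h1 : (detonate_bombs_alt grid i)[j]? = none := by
      apply List.getElem?_eq_none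
      rw [pvB_length]; omega
    have h2 : grid[j]? = none := List.getElem?_eq_none (by omega)
    rw [pvCell, pvCell, h1, h2]
    simp

theorem detonate_bombs_spec : Claim_equal_detonate_bombs := by
  intro grid i _ _
  unfold Spec_detonate_bombs
  rw [pvA_eq]
  have hL : ∀ x ∈ (pvBombs grid (i - 3)).flatMap (pvTargets grid), 0 ≤ x.1 ∧ 0 ≤ x.2 := by
    intro x hx
    rw [List.mem_flatMap] at hx
    obtain ⟨c, hc, hx⟩ := hx
    exact pvTargets_nonneg grid c (pvBombs_nonneg grid (i - 3) c hc) x hx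
  symm
  apply pvGrid_ext
  · rw [pvB_length, pvWriteAll_length _ hL]
  · intro j; rw [pvB_rowlen, pvWriteAll_rowlen _ hL]
  · intro j k
    rw [pvB_cell, pvWriteAll_cell _ hL]
    by_cases hs : (pvCell grid j k).isSome
    · obtain ⟨v, hv⟩ := Option.isSome_iff_exists.mp hs
      obtain ⟨hj, hk, _⟩ := (pvCell_eq_some grid j k v).mp hv
      simp only [pvMem_iff_cond grid (i - 3) j k hj hk]
    · have hs' : (pvCell grid j k).isSome = false := by simpa using hs
      simp [hs']
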